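-- pv_equiv track=rewrite | github.com/coleman7245/Portfolio | Python Scripts/AI Scripts/iterativedeepening.py | findBlank_8p
-- ===== SOURCE A (Python) =====
-- def findBlank_8p(state):
-- 	    #r: Row index.
--         r = 0
--         #c: Column index.
--         c = 0
--         #For every space on the board:
--         for s in state:
-- 			#If this space is the blank space:
--             if s == 0:
-- 				#Return the row and column indices as a tuple.
--                 return (r, c)
--             #Otherwise, move onto the next space.
--             else:
-- 				#Increment the column idex.
--                 c += 1
--                 #If the column index is out of bounds:
--                 if c == 3:
-- 					#Increment the row index.
--                     r += 1
--                     #Set the column index to 0.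
--                     c = 0
--         #Return an error message if the blank space was never found.
--         return 'Blank not found!'
-- ===== SOURCE B (Python) =====
-- def findBlank_8p(state):
--     if 0 not in state:
--         return 'Blank not found!'
--     return divmod(state.index(0), 3)
-- ===== Notes on version B (the rewrite author's own statement) =====
-- stated objective: simpler
-- what changed: Replaces the per-cell loop with manual column increment/reset and row bump by a membership test plus divmod(state.index(0), 3), a closed-form split of the linear index.
-- outside the precondition, e.g. on findBlank_8p([1, 2, 3]): A returns 'Blank not found!', B returns 'Blank not found!'
import Mathlib
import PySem

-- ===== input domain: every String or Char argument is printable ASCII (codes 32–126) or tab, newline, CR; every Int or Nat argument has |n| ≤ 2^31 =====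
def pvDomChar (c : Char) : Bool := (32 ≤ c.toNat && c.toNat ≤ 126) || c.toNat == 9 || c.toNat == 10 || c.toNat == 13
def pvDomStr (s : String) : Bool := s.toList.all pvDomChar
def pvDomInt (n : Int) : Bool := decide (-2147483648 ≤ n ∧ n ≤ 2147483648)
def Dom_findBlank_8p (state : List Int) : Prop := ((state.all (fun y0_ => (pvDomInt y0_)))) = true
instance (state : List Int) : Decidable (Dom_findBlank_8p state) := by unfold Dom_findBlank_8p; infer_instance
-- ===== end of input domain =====

-- B replaces A's per-cell loop with manual column/row bookkeeping by a closed-form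
-- divmod split of the index of 0 (objective: simpler). Pre_ excludes states without 0,
-- on which A returns the string 'Blank not found!' instead of an (int, int) tuple.


-- ===== PORT A =====
-- the for-loop over the board, carrying the row/column counters
def findBlank_8pLoop (state : List Int) (r c : Int) : Int × Int :=
  match state with
  | [] => (r, c)  -- Python returns the string 'Blank not found!' here; outside Pre_
  | s :: rest =>
    if s = 0 then (r, c)
    else
      let c' := c + 1
      if c' = 3 then findBlank_8pLoop rest (r + 1) 0
      else findBlank_8pLoop rest r c'

def findBlank_8p (state : List Int) : Int × Int := findBlank_8pLoop state 0 0

-- ===== PORT B =====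
def findBlank_8p_alt (state : List Int) : Int × Int :=
  if (0 : Int) ∈ state then
    let i : Int := (((PySem.List.index? state 0).getD 0 : Nat) : Int)
    (PySem.Int.floordiv i 3, PySem.Int.mod i 3)
  else (0, 0)  -- Python B returns the string 'Blank not found!' here; outside Pre_

-- ===== PRECONDITION & SPEC =====
-- Pre_ excludes states not containing 0: there A (and B) return the string
-- 'Blank not found!', which is not a value of the declared (Int × Int) type.
def Pre_findBlank_8p (state : List Int) : Prop := (0 : Int) ∈ state
instance (state : List Int) : Decidable (Pre_findBlank_8p state) := by unfold Pre_findBlank_8p; infer_instance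
def pvWitness_findBlank_8p : List Int := [1, 0, 2]

def Spec_findBlank_8p (state : List Int) (out : Int × Int) : Prop := out = findBlank_8p_alt state
instance (state : List Int) (out : Int × Int) : Decidable (Spec_findBlank_8p state out) := by unfold Spec_findBlank_8p; infer_instance

-- ===== CLAIM (what is proved, stated in full; the proofs are below) =====
def Claim_equal_findBlank_8p : Prop := ∀ (state : List Int), Dom_findBlank_8p state → Pre_findBlank_8p state → Spec_findBlank_8p state (findBlank_8p state)

-- ===== LEMMAS AND PROOFS =====

-- invariant of A's loop: starting at column c (0 ≤ c < 3), if the first 0 of the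
-- remaining board is at offset i, the loop returns the divmod split of c + i.
theorem findBlank_8pLoop_eq (state : List Int) :
    ∀ (r c : Int) (i : Nat), 0 ≤ c → c < 3 → PySem.List.index? state 0 = some i →
      findBlank_8pLoop state r c = (r + (c + (i : Int)) / 3, (c + (i : Int)) % 3) := by
  induction state with
  | nil => intro r c i _ _ h; simp [PySem.List.index?_eq_idxOf?] at h
  | cons s rest ih =>
    intro r c i h0 h3 h
    by_cases hs : s = 0
    · subst hs
      rw [PySem.List.index?_cons_self] at h
      obtain rfl : (0 : Nat) = i := Option.some.inj h
      have he : findBlank_8pLoop (0 :: rest) r c = (r, c) := by simp [findBlank_8pLoop]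
      rw [he]
      simp only [Prod.mk.injEq]
      push_cast
      constructor <;> omega
    · rw [PySem.List.index?_cons_of_ne rest hs] at h
      obtain ⟨i', hi', rfl⟩ := Option.map_eq_some_iff.mp h
      by_cases hc : c + 1 = 3
      · rw [show findBlank_8pLoop (s :: rest) r c = findBlank_8pLoop rest (r + 1) 0 by
          simp [findBlank_8pLoop, hs, hc]]
        rw [ih (r + 1) 0 i' (by omega) (by omega) hi']
        simp only [Prod.mk.injEq]
        push_cast
        constructor <;> omega
      · rw [show findBlank_8pLoop (s :: rest) r c = findBlank_8pLoop rest r (c + 1) by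
          simp [findBlank_8pLoop, hs, hc]]
        rw [ih r (c + 1) i' (by omega) (by omega) hi']
        simp only [Prod.mk.injEq]
        push_cast
        constructor <;> omega

-- ===== VERDICT (by name: the statement is the Claim_ definition above) =====
theorem findBlank_8p_spec : Claim_equal_findBlank_8p := by
  intro state _ hpre
  have hmem : (0 : Int) ∈ state := hpre
  unfold Spec_findBlank_8p findBlank_8p findBlank_8p_alt
  obtain ⟨i, hi⟩ := Option.isSome_iff_exists.mp ((PySem.List.index?_isSome_iff state 0).mpr hmem)
  rw [if_pos hmem]
  rw [findBlank_8pLoop_eq state 0 0 i (by omega) (by omega) hi, hi]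
  simp only [Option.getD_some]
  rw [PySem.Int.floordiv_eq_ediv_of_pos (by omega), PySem.Int.mod_eq_emod_of_pos (by omega)]
  simp
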